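-- pv_equiv track=rewrite | github.com/Towareesh/algorithms | search/searchesdiv.py | search_v3
-- ===== SOURCE A (Python) =====
-- def search_v3(hash_set, count_divs):
--     #  count_divs: 4
--     #  hash_set  : 10000+1 | 20000+1 | 25000+1 | 250000+1
--     #  time_v1   : 0.16s   | 0.45s   | 0.64s   | 19.44s
--     #  time_v2   : 0.12s   | 0.33s   | 0.45s   | 11.58s
--     #  time_v3   : 0.08s   | 0.19s   | 0.23s   | 6.16s
--
--     ''' time_v1 - обычная версия search_divs()
--         time_v2 - версия с отсекателем списка line 51
--         time_v3 - версия v2 с единичным возовом search_divs(i) для проверки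
--
--         функция примает список = hash_set чисел и возвращает среди них такие,
--         количество делителей у которых = count_divs
--     '''
--     res = {}
--     def search_divs(num):
--         div = 1
--         divisors = []
--         while div ** 2 <= num:
--             if num % div == 0:
--                 divisors.append(div)
--                 if div != num // div:
--                     divisors.append(num // div)
--             if len(divisors) > count_divs:
--                 return None
--             div += 1
--         divisors.sort()
--         return divisors
--     for i in hash_set:
--         divisors = search_divs(i)
--         if divisors != None:
--             res.update({i: divisors})
--     return res
-- ===== SOURCE B (Python) =====
-- def search_v3(hash_set, count_divs):
--     # Inverted traversal: divisor candidates d form the OUTER loop and all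
--     # positive values are updated in one batch per d, accumulated in a dict;
--     # a final pass sorts each list and keeps those with <= count_divs divisors.
--     acc = {i: [] for i in hash_set if i > 0}
--     mx = max(acc, default=0)
--     d = 1
--     while d * d <= mx:
--         for i in acc:
--             if d * d <= i and i % d == 0:
--                 acc[i].append(d)
--                 q = i // d
--                 if q != d:
--                     acc[i].append(q)
--         d += 1
--     res = {}
--     for i in hash_set:
--         divs = sorted(acc.get(i, []))
--         if len(divs) <= count_divs:
--             res[i] = divs
--     return res
-- ===== Notes on version B (the rewrite author's own statement) =====
-- stated objective: alternative
-- what changed: B inverts the traversal: divisor candidates d form the outer loop and update all positive values in one batch per d via an accumulator dict (plus a final sort-and-filter pass), instead of A's per-element trial-division loop with an in-loop None-sentinel cutoff.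
-- intended difference: When count_divs is negative and hash_set contains a non-positive number, A still returns those non-positive elements mapped to [] (its divisor loop never runs, so the cutoff check never fires), while B returns the empty dict; no number has at most a negative number of divisors, so B's is the intended value. — e.g. on search_v3([0], -1): A returns [(0, [])], B returns []
import Mathlib
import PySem

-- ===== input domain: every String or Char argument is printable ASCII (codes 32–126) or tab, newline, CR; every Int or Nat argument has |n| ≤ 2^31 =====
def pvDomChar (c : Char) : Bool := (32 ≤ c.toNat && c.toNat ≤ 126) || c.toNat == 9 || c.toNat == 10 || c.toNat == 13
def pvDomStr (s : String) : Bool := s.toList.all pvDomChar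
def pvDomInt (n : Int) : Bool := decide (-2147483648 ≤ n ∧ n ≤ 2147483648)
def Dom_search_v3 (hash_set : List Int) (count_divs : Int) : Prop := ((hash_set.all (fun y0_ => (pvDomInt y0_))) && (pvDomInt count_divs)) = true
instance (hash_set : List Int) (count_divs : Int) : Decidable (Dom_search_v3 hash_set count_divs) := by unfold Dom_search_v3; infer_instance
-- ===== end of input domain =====

-- B inverts the traversal: the divisor candidates d are the OUTER loop and all positive
-- values are updated in one batch per d through an accumulator dict, with a final
-- sort-and-filter pass — instead of A's per-element trial-division loop with an in-loop
-- None cutoff (objective: alternative).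

-- ===== PORT A =====
-- the inner `while div ** 2 <= num` loop of search_divs; the Nat fuel only makes
-- the recursion structural, it is never exhausted at the call below
def searchDivsLoop (num count_divs : Int) : Nat → Int → List Int → Option (List Int)
  | 0, _, divisors => some divisors
  | fuel + 1, div, divisors =>
    if div * div ≤ num then
      let divisors :=
        if PySem.Int.mod num div = 0 then
          let divisors := divisors ++ [div]
          if div ≠ PySem.Int.floordiv num div then divisors ++ [PySem.Int.floordiv num div]
          else divisors
        else divisors
      if (divisors.length : Int) > count_divs then none
      else searchDivsLoop num count_divs fuel (div + 1) divisors
    else some divisors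

-- search_divs(num): trial division from 1, early None cutoff, final sort
def searchDivs (num count_divs : Int) : Option (List Int) :=
  (searchDivsLoop num count_divs (num.toNat + 2) 1 []).map
    (fun divisors => PySem.List.sorted divisors (fun x => x) false)

def search_v3 (hash_set : List Int) (count_divs : Int) : List (Int × List Int) :=
  (hash_set.foldl
    (fun res i =>
      match searchDivs i count_divs with
      | none => res
      | some divisors => res.insert i divisors)
    (PySem.Dict.empty)).items

-- ===== PORT B =====
-- acc = {i: [] for i in hash_set if i > 0}
def altAcc0 (hash_set : List Int) : PySem.Dict Int (List Int) :=
  hash_set.foldl (fun d i => if 0 < i then d.insert i [] else d) PySem.Dict.empty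

-- one batch pass `for i in acc:` for a fixed candidate d
def altStep (d : Int) (acc : PySem.Dict Int (List Int)) : PySem.Dict Int (List Int) :=
  acc.keys.foldl
    (fun a i =>
      if d * d ≤ i ∧ PySem.Int.mod i d = 0 then
        let a := a.modify i [] (fun l => l ++ [d])
        let q := PySem.Int.floordiv i d
        if q ≠ d then a.modify i [] (fun l => l ++ [q]) else a
      else a)
    acc

-- `while d * d <= mx:` (fuel only makes the recursion structural, never exhausted)
def altWhile (mx : Int) : Nat → Int → PySem.Dict Int (List Int) → PySem.Dict Int (List Int)
  | 0, _, acc => acc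
  | fuel + 1, d, acc =>
    if d * d ≤ mx then altWhile mx fuel (d + 1) (altStep d acc) else acc

def search_v3_alt (hash_set : List Int) (count_divs : Int) : List (Int × List Int) :=
  let acc0 := altAcc0 hash_set
  let mx := PySem.List.maxD acc0.keys (fun x => x) 0
  let acc := altWhile mx (mx.toNat + 2) 1 acc0
  (hash_set.foldl
    (fun res i =>
      let divs := PySem.List.sorted (acc.getD i []) (fun x => x) false
      if (divs.length : Int) ≤ count_divs then res.insert i divs else res)
    (PySem.Dict.empty)).items

-- ===== PRECONDITION & SPEC =====
-- When count_divs is negative and hash_set contains a non-positive number, A still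
-- returns those non-positive elements mapped to [] (its divisor loop never runs, so
-- the cutoff check never fires), while B returns the empty dict; no number has at
-- most a negative number of divisors, so B's is the intended value.
def D_search_v3 (hash_set : List Int) (count_divs : Int) : Prop :=
  count_divs < 0 ∧ ∃ x ∈ hash_set, x ≤ 0
instance (hash_set : List Int) (count_divs : Int) : Decidable (D_search_v3 hash_set count_divs) := by unfold D_search_v3; infer_instance

def Spec_search_v3 (hash_set : List Int) (count_divs : Int) (out : List (Int × List Int)) : Prop := ¬ D_search_v3 hash_set count_divs → out = search_v3_alt hash_set count_divs
instance (hash_set : List Int) (count_divs : Int) (out : List (Int × List Int)) : Decidable (Spec_search_v3 hash_set count_divs out) := by unfold Spec_search_v3; infer_instance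

def pvDiffWitness_search_v3 : List Int × Int := ([0], -1)
def pvDiffWitnessOut_search_v3 : (List (Int × List Int)) × (List (Int × List Int)) := ([(0, [])], [])

-- ===== CLAIM (what is proved, stated in full; the proofs are below) =====
def Claim_unchanged_search_v3 : Prop := ∀ (hash_set : List Int) (count_divs : Int), Dom_search_v3 hash_set count_divs → Spec_search_v3 hash_set count_divs (search_v3 hash_set count_divs)
def Claim_changed_search_v3 : Prop := Dom_search_v3 (pvDiffWitness_search_v3.1) (pvDiffWitness_search_v3.2) ∧ D_search_v3 (pvDiffWitness_search_v3.1) (pvDiffWitness_search_v3.2) ∧ search_v3 (pvDiffWitness_search_v3.1) (pvDiffWitness_search_v3.2) = pvDiffWitnessOut_search_v3.1 ∧ search_v3_alt (pvDiffWitness_search_v3.1) (pvDiffWitness_search_v3.2) = pvDiffWitnessOut_search_v3.2 ∧ pvDiffWitnessOut_search_v3.1 ≠ pvDiffWitnessOut_search_v3.2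
def Claim_exact_search_v3 : Prop := ∀ (hash_set : List Int) (count_divs : Int), Dom_search_v3 hash_set count_divs → D_search_v3 hash_set count_divs → search_v3 hash_set count_divs ≠ search_v3_alt hash_set count_divs

-- ===== LEMMAS AND PROOFS =====

-- the cutoff-free content of A's inner loop (proof-side reference)
def pureLoop (num : Int) : Nat → Int → List Int → List Int
  | 0, _, l => l
  | fuel + 1, d, l =>
    if d * d ≤ num then
      pureLoop num fuel (d + 1)
        (if PySem.Int.mod num d = 0 then
           if d ≠ PySem.Int.floordiv num d then (l ++ [d]) ++ [PySem.Int.floordiv num d]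
           else l ++ [d]
         else l)
    else l

-- the body of altStep's inner `for` loop, named for the proofs
def altF (d : Int) (a : PySem.Dict Int (List Int)) (i : Int) : PySem.Dict Int (List Int) :=
  if d * d ≤ i ∧ PySem.Int.mod i d = 0 then
    let a := a.modify i [] (fun l => l ++ [d])
    let q := PySem.Int.floordiv i d
    if q ≠ d then a.modify i [] (fun l => l ++ [q]) else a
  else a

lemma altStep_eq (d : Int) (acc : PySem.Dict Int (List Int)) :
    altStep d acc = acc.keys.foldl (altF d) acc := rfl

-- the effect of one altStep pass on the entry of key i
def bstep (d i : Int) (l : List Int) : List Int :=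
  if d * d ≤ i ∧ PySem.Int.mod i d = 0 then
    if PySem.Int.floordiv i d ≠ d then (l ++ [d]) ++ [PySem.Int.floordiv i d] else l ++ [d]
  else l

-- the per-key content of B's while loop
def bwhile (mx i : Int) : Nat → Int → List Int → List Int
  | 0, _, l => l
  | fuel + 1, d, l => if d * d ≤ mx then bwhile mx i fuel (d + 1) (bstep d i l) else l

-- acc0: keys are exactly the distinct positive elements, nodup, all entries []
lemma altAcc0_aux_nodup : ∀ (hs : List Int) (a : PySem.Dict Int (List Int)),
    a.keys.Nodup →
    ((hs.foldl (fun d i => if 0 < i then d.insert i ([] : List Int) else d) a).keys).Nodup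
  | [], a, h => h
  | j :: t, a, h => by
    simp only [List.foldl_cons]
    apply altAcc0_aux_nodup t
    split
    · exact PySem.Dict.nodup_keys_insert a j [] h
    · exact h

lemma altAcc0_nodup (hs : List Int) : (altAcc0 hs).keys.Nodup :=
  altAcc0_aux_nodup hs PySem.Dict.empty (by simp [PySem.Dict.keys_empty])

lemma altAcc0_aux_mem : ∀ (hs : List Int) (a : PySem.Dict Int (List Int)) (i : Int),
    i ∈ (hs.foldl (fun d i => if 0 < i then d.insert i ([] : List Int) else d) a).keys ↔
      (i ∈ hs ∧ 0 < i) ∨ i ∈ a.keys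
  | [], a, i => by simp
  | j :: t, a, i => by
    simp only [List.foldl_cons]
    rw [altAcc0_aux_mem t]
    by_cases hj : 0 < j
    · rw [if_pos hj, PySem.Dict.mem_keys_insert]
      constructor
      · rintro (⟨hm, hp⟩ | hij | hk)
        · exact Or.inl ⟨List.mem_cons_of_mem _ hm, hp⟩
        · exact Or.inl ⟨by rw [hij]; exact List.mem_cons_self .., by omega⟩
        · exact Or.inr hk
      · rintro (⟨hm, hp⟩ | hk)
        · rcases List.mem_cons.mp hm with h | h
          · exact Or.inr (Or.inl h)
          · exact Or.inl ⟨h, hp⟩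
        · exact Or.inr (Or.inr hk)
    · rw [if_neg hj]
      constructor
      · rintro (⟨hm, hp⟩ | hk)
        · exact Or.inl ⟨List.mem_cons_of_mem _ hm, hp⟩
        · exact Or.inr hk
      · rintro (⟨hm, hp⟩ | hk)
        · rcases List.mem_cons.mp hm with h | h
          · exact absurd (h ▸ hp) hj
          · exact Or.inl ⟨h, hp⟩
        · exact Or.inr hk

lemma mem_altAcc0 (hs : List Int) (i : Int) :
    i ∈ (altAcc0 hs).keys ↔ i ∈ hs ∧ 0 < i := by
  unfold altAcc0
  rw [altAcc0_aux_mem]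
  simp [PySem.Dict.keys_empty]

lemma altAcc0_aux_getD : ∀ (hs : List Int) (a : PySem.Dict Int (List Int)) (i : Int),
    (hs.foldl (fun d i => if 0 < i then d.insert i ([] : List Int) else d) a).getD i [] =
      if i ∈ hs ∧ 0 < i then [] else a.getD i []
  | [], a, i => by simp
  | j :: t, a, i => by
    simp only [List.foldl_cons]
    rw [altAcc0_aux_getD t]
    by_cases hj : 0 < j
    · rw [if_pos hj]
      by_cases hit : i ∈ t ∧ 0 < i
      · rw [if_pos hit, if_pos ⟨List.mem_cons_of_mem _ hit.1, hit.2⟩]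
      · rw [if_neg hit, PySem.Dict.getD_insert]
        by_cases hij : i = j
        · rw [if_pos hij, if_pos ⟨by rw [hij]; exact List.mem_cons_self .., by omega⟩]
        · rw [if_neg hij, if_neg (by
            rintro ⟨hm, hp⟩
            rcases List.mem_cons.mp hm with h | h
            · exact hij h
            · exact hit ⟨h, hp⟩)]
    · rw [if_neg hj]
      by_cases hit : i ∈ t ∧ 0 < i
      · rw [if_pos hit, if_pos ⟨List.mem_cons_of_mem _ hit.1, hit.2⟩]
      · rw [if_neg hit, if_neg (by
          rintro ⟨hm, hp⟩
          rcases List.mem_cons.mp hm with h | h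
          · exact hj (h ▸ hp)
          · exact hit ⟨h, hp⟩)]

lemma altAcc0_getD (hs : List Int) (i : Int) : (altAcc0 hs).getD i [] = [] := by
  unfold altAcc0
  rw [altAcc0_aux_getD]
  split
  · rfl
  · simp [PySem.Dict.getD_empty]

-- one altF step only touches its own key
lemma altF_getD (d j i : Int) (a : PySem.Dict Int (List Int)) :
    (altF d a j).getD i [] = if i = j then bstep d j (a.getD j []) else a.getD i [] := by
  unfold altF bstep
  by_cases hg : d * d ≤ j ∧ PySem.Int.mod j d = 0 <;>
  by_cases hq : PySem.Int.floordiv j d = d <;>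
  by_cases hij : i = j <;>
  simp [hg, hq, hij, PySem.Dict.getD_modify]

lemma altF_keys (d j : Int) (a : PySem.Dict Int (List Int)) (hj : j ∈ a.keys) :
    (altF d a j).keys = a.keys := by
  unfold altF
  have hc : a.contains j = true := (PySem.Dict.contains_iff_mem_keys a j).mpr hj
  have h1 : (a.modify j [] (fun l => l ++ [d])).keys = a.keys := by
    rw [PySem.Dict.keys_modify, PySem.Dict.keys_insert_of_contains _ _ hc]
  by_cases hg : d * d ≤ j ∧ PySem.Int.mod j d = 0
  · simp only [if_pos hg]
    by_cases hq : PySem.Int.floordiv j d ≠ d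
    · simp only [if_pos hq]
      have hc1 : (a.modify j [] (fun l => l ++ [d])).contains j = true := by
        rw [PySem.Dict.contains_iff_mem_keys, h1]; exact hj
      rw [PySem.Dict.keys_modify, PySem.Dict.keys_insert_of_contains _ _ hc1, h1]
    · simp only [if_neg hq]; exact h1
  · simp only [if_neg hg]

lemma altF_fold_keys (d : Int) : ∀ (ks : List Int) (a : PySem.Dict Int (List Int)),
    (∀ j ∈ ks, j ∈ a.keys) → (ks.foldl (altF d) a).keys = a.keys
  | [], a, _ => rfl
  | j :: t, a, h => by
    simp only [List.foldl_cons]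
    have hk : (altF d a j).keys = a.keys := altF_keys d j a (h j (List.mem_cons_self ..))
    rw [altF_fold_keys d t (altF d a j) (fun x hx => by rw [hk]; exact h x (List.mem_cons_of_mem _ hx)), hk]

lemma altF_fold_getD (d : Int) : ∀ (ks : List Int), ks.Nodup →
    ∀ (a : PySem.Dict Int (List Int)) (i : Int),
    (ks.foldl (altF d) a).getD i [] =
      if i ∈ ks then bstep d i (a.getD i []) else a.getD i []
  | [], _, a, i => by simp
  | j :: t, hnd, a, i => by
    simp only [List.foldl_cons]
    rw [altF_fold_getD d t (List.nodup_cons.mp hnd).2, altF_getD]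
    by_cases hij : i = j
    · subst hij
      rw [if_neg (List.nodup_cons.mp hnd).1, if_pos rfl, if_pos (List.mem_cons_self ..)]
    · simp only [if_neg hij, List.mem_cons]
      by_cases hit : i ∈ t
      · rw [if_pos hit, if_pos (Or.inr hit)]
      · rw [if_neg hit, if_neg (by rintro (h | h); exact hij h; exact hit h)]

lemma altStep_keys (d : Int) (acc : PySem.Dict Int (List Int)) :
    (altStep d acc).keys = acc.keys := by
  rw [altStep_eq]
  exact altF_fold_keys d acc.keys acc (fun _ h => h)

lemma altStep_getD (d : Int) (acc : PySem.Dict Int (List Int)) (hnd : acc.keys.Nodup) (i : Int) :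
    (altStep d acc).getD i [] =
      if i ∈ acc.keys then bstep d i (acc.getD i []) else acc.getD i [] := by
  rw [altStep_eq]
  exact altF_fold_getD d acc.keys hnd acc i

lemma altWhile_keys (mx : Int) : ∀ (fuel : Nat) (d : Int) (acc : PySem.Dict Int (List Int)),
    (altWhile mx fuel d acc).keys = acc.keys
  | 0, _, _ => rfl
  | fuel + 1, d, acc => by
    simp only [altWhile]
    split
    · rw [altWhile_keys mx fuel (d + 1) (altStep d acc), altStep_keys]
    · rfl

lemma altWhile_getD (mx : Int) : ∀ (fuel : Nat) (d : Int) (acc : PySem.Dict Int (List Int)),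
    acc.keys.Nodup → ∀ (i : Int),
    (altWhile mx fuel d acc).getD i [] =
      if i ∈ acc.keys then bwhile mx i fuel d (acc.getD i []) else acc.getD i []
  | 0, d, acc, _, i => by
    simp only [altWhile, bwhile]
    split <;> rfl
  | fuel + 1, d, acc, hnd, i => by
    simp only [altWhile, bwhile]
    split
    · rw [altWhile_getD mx fuel (d + 1) (altStep d acc)
        (by rw [altStep_keys]; exact hnd), altStep_keys, altStep_getD d acc hnd]
      split
      · rfl
      · rfl
    · split <;> rfl

-- a key past its square root is never touched again
lemma bwhile_stall (mx i : Int) : ∀ (fuel : Nat) (d : Int) (l : List Int),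
    1 ≤ d → i < d * d → bwhile mx i fuel d l = l
  | 0, _, _, _, _ => rfl
  | fuel + 1, d, l, hd, hlt => by
    simp only [bwhile]
    split
    · rw [bstep, if_neg (by rintro ⟨h, -⟩; omega)]
      exact bwhile_stall mx i fuel (d + 1) l (by omega) (by nlinarith)
    · rfl

-- for i ≤ mx the per-key content of B's loop is A's cutoff-free loop
lemma bwhile_eq_pureLoop (mx i : Int) (hi : i ≤ mx) :
    ∀ (fuel : Nat) (d : Int) (l : List Int), 1 ≤ d →
    bwhile mx i fuel d l = pureLoop i fuel d l
  | 0, _, _, _ => rfl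
  | fuel + 1, d, l, hd => by
    simp only [bwhile, pureLoop]
    by_cases hgi : d * d ≤ i
    · rw [if_pos (le_trans hgi hi), if_pos hgi]
      have harg : bstep d i l =
          (if PySem.Int.mod i d = 0 then
             if d ≠ PySem.Int.floordiv i d then (l ++ [d]) ++ [PySem.Int.floordiv i d]
             else l ++ [d]
           else l) := by
        unfold bstep
        by_cases hm : PySem.Int.mod i d = 0
        · rw [if_pos ⟨hgi, hm⟩, if_pos hm]
          by_cases hq : d = PySem.Int.floordiv i d
          · rw [if_neg (by omega), if_neg (by omega)]
          · rw [if_pos (by omega), if_pos (by omega)]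
        · rw [if_neg (by rintro ⟨-, h⟩; exact hm h), if_neg hm]
      rw [harg]
      exact bwhile_eq_pureLoop mx i hi fuel (d + 1) _ (by omega)
    · rw [if_neg hgi]
      split
      · rw [bstep, if_neg (by rintro ⟨h, -⟩; omega)]
        exact bwhile_stall mx i fuel (d + 1) l (by omega) (by nlinarith)
      · rfl

-- pureLoop is fuel-insensitive once the fuel covers the remaining iterations
lemma pureLoop_fuel (num : Int) : ∀ (f1 f2 : Nat) (d : Int) (l : List Int), 1 ≤ d →
    (num + 1 - d).toNat < f1 → (num + 1 - d).toNat < f2 →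
    pureLoop num f1 d l = pureLoop num f2 d l
  | 0, f2, d, l, hd, h1, h2 => by omega
  | f1 + 1, 0, d, l, hd, h1, h2 => by omega
  | f1 + 1, f2 + 1, d, l, hd, h1, h2 => by
    simp only [pureLoop]
    split
    · next hg =>
      have hdn : d ≤ num := by nlinarith
      exact pureLoop_fuel num f1 f2 (d + 1) _ (by omega) (by omega) (by omega)
    · rfl

lemma pureLoop_len_mono (num : Int) : ∀ (fuel : Nat) (d : Int) (l : List Int),
    l.length ≤ (pureLoop num fuel d l).length
  | 0, _, _ => le_refl _
  | fuel + 1, d, l => by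
    simp only [pureLoop]
    split
    · refine le_trans ?_ (pureLoop_len_mono num fuel (d + 1) _)
      split
      · split <;> simp
      · exact le_refl _
    · exact le_refl _

-- A's loop = pureLoop guarded by the final length
lemma searchDivsLoop_eq (num cd : Int) : ∀ (fuel : Nat) (d : Int) (acc : List Int),
    (num + 1 - d).toNat < fuel → 1 ≤ d →
    ((acc.length : Int) ≤ cd ∨ d * d ≤ num) →
    searchDivsLoop num cd fuel d acc =
      if ((pureLoop num fuel d acc).length : Int) ≤ cd then some (pureLoop num fuel d acc)
      else none
  | 0, d, acc, hf, _, _ => by omega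
  | fuel + 1, d, acc, hf, hd, hinv => by
    by_cases hg : d * d ≤ num
    · have hdn : d ≤ num := by nlinarith
      simp only [searchDivsLoop, pureLoop, if_pos hg]
      set acc' := (if PySem.Int.mod num d = 0 then
           if d ≠ PySem.Int.floordiv num d then (acc ++ [d]) ++ [PySem.Int.floordiv num d]
           else acc ++ [d]
         else acc) with hacc'
      by_cases hlen : ((acc'.length : Int)) > cd
      · rw [if_pos hlen, if_neg]
        have := pureLoop_len_mono num fuel (d + 1) acc'
        omega
      · rw [if_neg hlen]
        exact searchDivsLoop_eq num cd fuel (d + 1) acc' (by omega) (by omega)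
          (Or.inl (by omega))
    · simp only [searchDivsLoop, pureLoop, if_neg hg]
      rw [if_pos (hinv.resolve_right hg)]

lemma searchDivs_eq (num cd : Int) (h : 0 ≤ cd ∨ 1 ≤ num) :
    searchDivs num cd =
      if ((pureLoop num (num.toNat + 2) 1 []).length : Int) ≤ cd then
        some (PySem.List.sorted (pureLoop num (num.toNat + 2) 1 []) (fun x => x) false)
      else none := by
  unfold searchDivs
  rw [searchDivsLoop_eq num cd (num.toNat + 2) 1 [] (by omega) le_rfl
    (by simpa using h)]
  split
  · rfl
  · rfl

lemma searchDivs_nonpos (num cd : Int) (h : num ≤ 0) : searchDivs num cd = some [] := by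
  have h2 : num.toNat = 0 := Int.toNat_of_nonpos h
  unfold searchDivs
  rw [h2]
  show (searchDivsLoop num cd (Nat.succ (Nat.succ 0)) 1 []).map _ = some []
  simp only [searchDivsLoop]
  rw [if_neg (by nlinarith : ¬ (1 : Int) * 1 ≤ num)]
  rfl

-- every key is bounded by mx = max(acc, default=0)
lemma key_le_maxD (ks : List Int) (i : Int) (h : i ∈ ks) :
    i ≤ PySem.List.maxD ks (fun x => x) 0 := by
  unfold PySem.List.maxD
  rcases hm : PySem.List.max? ks (fun x => x) with _ | m
  · exact absurd (((PySem.List.max?_eq_none_iff ks (fun x => x)).mp hm) ▸ h) List.not_mem_nil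
  · simpa using PySem.List.max?_isMax hm i h

-- the two final folds agree outside D_
lemma final_fold_eq (cd : Int) (acc : PySem.Dict Int (List Int)) :
    ∀ (hs : List Int) (res : PySem.Dict Int (List Int)),
    (∀ i ∈ hs, (0 ≤ cd ∨ 1 ≤ i) ∧
      (0 < i → acc.getD i [] = pureLoop i (i.toNat + 2) 1 []) ∧
      (i ≤ 0 → acc.getD i [] = [])) →
    hs.foldl (fun res i =>
      match searchDivs i cd with
      | none => res
      | some divisors => res.insert i divisors) res =
    hs.foldl (fun res i =>
      let divs := PySem.List.sorted (acc.getD i []) (fun x => x) false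
      if (divs.length : Int) ≤ cd then res.insert i divs else res) res
  | [], res, _ => rfl
  | i :: t, res, h => by
    obtain ⟨hcd, hpos, hnp⟩ := h i (List.mem_cons_self ..)
    have ht := fun r => final_fold_eq cd acc t r (fun j hj => h j (List.mem_cons_of_mem _ hj))
    simp only [List.foldl_cons]
    by_cases hi : 0 < i
    · rw [hpos hi, searchDivs_eq i cd (Or.inr (by omega))]
      have hlen : ((PySem.List.sorted (pureLoop i (i.toNat + 2) 1 []) (fun x => x) false).length : Int)
          = ((pureLoop i (i.toNat + 2) 1 []).length : Int) := by
        rw [PySem.List.length_sorted]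
      by_cases hc : ((pureLoop i (i.toNat + 2) 1 []).length : Int) ≤ cd
      · rw [if_pos hc, if_pos (by omega)]
        exact ht _
      · rw [if_neg hc, if_neg (by omega)]
        exact ht _
    · rw [hnp (by omega), searchDivs_nonpos i cd (by omega)]
      have hcd0 : (0 : Int) ≤ cd := by omega
      rw [if_pos (by simpa using hcd0)]
      exact ht _

-- B's final pass inserts nothing when count_divs < 0
lemma altB_neg (cd : Int) (hcd : cd < 0) (acc : PySem.Dict Int (List Int)) :
    ∀ (hs : List Int) (res : PySem.Dict Int (List Int)),
    hs.foldl (fun res i =>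
      let divs := PySem.List.sorted (acc.getD i []) (fun x => x) false
      if (divs.length : Int) ≤ cd then res.insert i divs else res) res = res
  | [], _ => rfl
  | i :: t, res => by
    simp only [List.foldl_cons]
    rw [if_neg (by
      intro hle
      have h0 : (0 : Int) ≤ ((PySem.List.sorted (acc.getD i []) (fun x => x) false).length : Int) :=
        Int.natCast_nonneg _
      omega)]
    exact altB_neg cd hcd acc t res

lemma sizeA_mono (cd : Int) : ∀ (hs : List Int) (res : PySem.Dict Int (List Int)),
    res.size ≤ (hs.foldl (fun res i =>
      match searchDivs i cd with
      | none => res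
      | some divisors => res.insert i divisors) res).size
  | [], res => le_rfl
  | i :: t, res => by
    simp only [List.foldl_cons]
    refine le_trans ?_ (sizeA_mono cd t _)
    rcases hsd : searchDivs i cd with _ | v
    · simp
    · simp only [PySem.Dict.size_insert]
      split <;> omega

lemma A_nonempty (cd : Int) : ∀ (hs : List Int) (res : PySem.Dict Int (List Int)) (x : Int),
    x ∈ hs → x ≤ 0 →
    1 ≤ (hs.foldl (fun res i =>
      match searchDivs i cd with
      | none => res
      | some divisors => res.insert i divisors) res).size
  | [], _, _, hx, _ => absurd hx List.not_mem_nil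
  | i :: t, res, x, hx, hx0 => by
    rcases List.mem_cons.mp hx with h | h
    · subst h
      simp only [List.foldl_cons, searchDivs_nonpos x cd hx0]
      refine le_trans ?_ (sizeA_mono cd t _)
      rw [PySem.Dict.size_insert]
      split
      · next hcont =>
          rw [PySem.Dict.contains_iff_mem_keys] at hcont
          have h2 := List.length_pos_of_ne_nil (List.ne_nil_of_mem hcont)
          simpa [PySem.Dict.keys] using h2
      · omega
    · simp only [List.foldl_cons]
      exact A_nonempty cd t _ x h hx0

-- ===== VERDICT (by name: the statement is the Claim_ definition above) =====
theorem search_v3_spec : Claim_unchanged_search_v3 := by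
  intro hs cd _ hnd
  unfold search_v3 search_v3_alt
  congr 1
  apply final_fold_eq
  intro i hi
  have hor : 0 ≤ cd ∨ 1 ≤ i := by
    by_cases hcd : 0 ≤ cd
    · exact Or.inl hcd
    · right
      unfold D_search_v3 at hnd
      push Not at hnd
      have := hnd (by omega) i hi
      omega
  refine ⟨hor, ?_, ?_⟩
  · intro hip
    have hik : i ∈ (altAcc0 hs).keys := (mem_altAcc0 hs i).mpr ⟨hi, hip⟩
    have hmx : i ≤ PySem.List.maxD (altAcc0 hs).keys (fun x => x) 0 := key_le_maxD _ i hik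
    set mx := PySem.List.maxD (altAcc0 hs).keys (fun x => x) 0 with hmxd
    rw [altWhile_getD mx (mx.toNat + 2) 1 (altAcc0 hs) (altAcc0_nodup hs) i, if_pos hik,
      altAcc0_getD hs i, bwhile_eq_pureLoop mx i hmx (mx.toNat + 2) 1 [] le_rfl]
    exact pureLoop_fuel i (mx.toNat + 2) (i.toNat + 2) 1 [] le_rfl (by omega) (by omega)
  · intro hin
    have hik : i ∉ (altAcc0 hs).keys := by
      rw [mem_altAcc0]; rintro ⟨-, h⟩; omega
    set mx := PySem.List.maxD (altAcc0 hs).keys (fun x => x) 0 with hmxd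
    rw [altWhile_getD mx (mx.toNat + 2) 1 (altAcc0 hs) (altAcc0_nodup hs) i, if_neg hik]
    unfold altAcc0
    rw [altAcc0_aux_getD]
    rw [if_neg (by rintro ⟨-, h⟩; omega)]
    simp

theorem search_v3_changed : Claim_changed_search_v3 := by
  unfold Claim_changed_search_v3; decide

theorem search_v3_tight : Claim_exact_search_v3 := by
  intro hs cd _ hD heq
  obtain ⟨hcd, x, hx, hx0⟩ := hD
  have hB : search_v3_alt hs cd = [] := by
    unfold search_v3_alt
    simp only [altB_neg cd hcd]
    rfl
  have hA : 1 ≤ (search_v3 hs cd).length := A_nonempty cd hs PySem.Dict.empty x hx hx0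
  rw [heq, hB] at hA
  simp at hA
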